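-- pv_equiv track=rewrite | github.com/VectorOps/code | src/vocode/ui/terminal/buf.py | _count_trailing_newlines
-- ===== SOURCE A (Python) =====
-- def _count_trailing_newlines(s: str) -> int:
--     count = 0
--     for char in reversed(s):
--         if char == '\n':
--             count += 1
--         else:
--             break
--     return count
-- ===== SOURCE B (Python) =====
-- def _count_trailing_newlines(s: str) -> int:
--     return len(s) - len(s.rstrip('\n'))
-- ===== Notes on version B (the rewrite author's own statement) =====
-- stated objective: idiomatic
-- what changed: Replaced the explicit reverse loop with break by a length difference against the string with its trailing newline characters stripped via str.rstrip, delegating the traversal to the library.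
import Mathlib
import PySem

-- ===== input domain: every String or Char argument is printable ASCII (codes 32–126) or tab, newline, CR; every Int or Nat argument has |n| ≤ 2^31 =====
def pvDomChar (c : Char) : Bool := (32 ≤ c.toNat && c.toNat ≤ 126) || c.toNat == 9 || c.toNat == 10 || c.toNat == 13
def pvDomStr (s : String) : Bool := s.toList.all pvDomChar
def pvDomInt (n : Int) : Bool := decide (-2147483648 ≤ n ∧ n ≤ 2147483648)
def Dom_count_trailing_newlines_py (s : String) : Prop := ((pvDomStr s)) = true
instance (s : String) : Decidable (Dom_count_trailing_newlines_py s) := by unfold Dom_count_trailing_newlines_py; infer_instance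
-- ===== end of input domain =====

-- B replaces A's explicit reverse loop by len(s) - len(s.rstrip('\n')); same result, more idiomatic.

-- ===== PORT A =====
-- the 'for char in reversed(s): if char == '\n': count += 1 else: break' loop
def pvLoopA : List Char → Int → Int
  | [], count => count
  | c :: rest, count => if c = '\n' then pvLoopA rest (count + 1) else count

def count_trailing_newlines_py (s : String) : Int :=
  pvLoopA s.toList.reverse 0

-- ===== PORT B =====
-- s.rstrip('\n'): drop the trailing run of '\n' characters (exact for this single-char strip set)
def pvRstripNl (cs : List Char) : List Char :=
  (cs.reverse.dropWhile (fun c => c = '\n')).reverse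

def count_trailing_newlines_py_alt (s : String) : Int :=
  (s.toList.length : Int) - (pvRstripNl s.toList).length

-- ===== PRECONDITION & SPEC =====
def Spec_count_trailing_newlines_py (s : String) (out : Int) : Prop := out = count_trailing_newlines_py_alt s
instance (s : String) (out : Int) : Decidable (Spec_count_trailing_newlines_py s out) := by unfold Spec_count_trailing_newlines_py; infer_instance

-- ===== CLAIM (what is proved, stated in full; the proofs are below) =====
def Claim_equal_count_trailing_newlines_py : Prop := ∀ (s : String), Dom_count_trailing_newlines_py s → Spec_count_trailing_newlines_py s (count_trailing_newlines_py s)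

-- ===== LEMMAS AND PROOFS =====

theorem pvLoopA_eq_takeWhile (l : List Char) (c : Int) :
    pvLoopA l c = c + (l.takeWhile (fun ch => ch = '\n')).length := by
  induction l generalizing c with
  | nil => simp [pvLoopA]
  | cons hd tl ih =>
    by_cases h : hd = '\n' <;> simp [pvLoopA, h, ih] <;> ring

-- ===== VERDICT (by name: the statement is the Claim_ definition above) =====
theorem count_trailing_newlines_py_spec : Claim_equal_count_trailing_newlines_py := by
  intro s _
  unfold Spec_count_trailing_newlines_py count_trailing_newlines_py count_trailing_newlines_py_alt pvRstripNl
  rw [pvLoopA_eq_takeWhile]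
  set l := s.toList.reverse with hl
  have hlen : s.toList.length = l.length := by simp [hl]
  have hsplit := List.takeWhile_append_dropWhile (p := fun ch => decide (ch = '\n')) (l := l)
  have : (l.takeWhile (fun ch => ch = '\n')).length + (l.dropWhile (fun ch => ch = '\n')).length = l.length := by
    conv_rhs => rw [← hsplit]
    rw [List.length_append]
  simp only [List.length_reverse, hlen]
  omega
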